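-- pv_equiv track=rewrite | github.com/iTsluku/segementation_text_to_json | Main.py | remove_linebreak_hyphen
-- ===== SOURCE A (Python) =====
-- def remove_linebreak_hyphen(s: str) -> str:
--     o = ""
--     prev = ""
--
--     for c in s:
--         if c == "\n" and prev == "-":
--             prev = ""
--         elif c == "\n":
--             o += prev
--             prev = ""
--         else:
--             o += prev
--             prev = c
--     o += prev
--     return o
-- ===== SOURCE B (Python) =====
-- def remove_linebreak_hyphen(s: str) -> str:
--     # Two ordered string passes: join hyphenated line breaks, then drop remaining newlines.
--     return s.replace("-\n", "").replace("\n", "")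
-- ===== Notes on version B (the rewrite author's own statement) =====
-- stated objective: simpler
-- what changed: Replaced the stateful one-character-lookbehind accumulator loop with two ordered whole-string passes: delete every "-\n" substring, then delete all remaining "\n".
import Mathlib
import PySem

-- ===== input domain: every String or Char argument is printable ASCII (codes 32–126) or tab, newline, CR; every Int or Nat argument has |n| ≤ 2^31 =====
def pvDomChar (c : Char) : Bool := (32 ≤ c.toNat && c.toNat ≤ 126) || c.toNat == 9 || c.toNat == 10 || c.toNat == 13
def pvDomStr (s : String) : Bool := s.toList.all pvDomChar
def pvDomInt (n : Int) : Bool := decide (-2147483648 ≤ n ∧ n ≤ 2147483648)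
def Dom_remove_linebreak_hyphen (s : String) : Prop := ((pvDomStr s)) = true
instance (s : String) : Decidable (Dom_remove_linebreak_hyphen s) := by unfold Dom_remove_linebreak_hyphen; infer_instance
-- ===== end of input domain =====

-- B replaces A's stateful one-character-lookbehind accumulator loop with two ordered
-- whole-string replace passes (delete "-\n", then delete "\n"); objective: simpler.

-- ===== PORT A =====
-- the body of A's for-loop: state = (o, prev), both kept as char lists
def pvStepA (st : List Char × List Char) (c : Char) : List Char × List Char :=
  if c = '\n' ∧ st.2 = ['-'] then (st.1, [])
  else if c = '\n' then (st.1 ++ st.2, [])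
  else (st.1 ++ st.2, [c])

def remove_linebreak_hyphen (s : String) : String :=
  let r := s.toList.foldl pvStepA ([], [])
  String.ofList (r.1 ++ r.2)

-- ===== PORT B =====
def remove_linebreak_hyphen_alt (s : String) : String :=
  PySem.Str.replace (PySem.Str.replace s "-\n" "") "\n" ""

-- ===== PRECONDITION & SPEC =====
def Spec_remove_linebreak_hyphen (s : String) (out : String) : Prop := out = remove_linebreak_hyphen_alt s
instance (s : String) (out : String) : Decidable (Spec_remove_linebreak_hyphen s out) := by unfold Spec_remove_linebreak_hyphen; infer_instance

-- ===== CLAIM (what is proved, stated in full; the proofs are below) =====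
def Claim_equal_remove_linebreak_hyphen : Prop := ∀ (s : String), Dom_remove_linebreak_hyphen s → Spec_remove_linebreak_hyphen s (remove_linebreak_hyphen s)

-- ===== LEMMAS AND PROOFS =====

-- the suffix A's loop will still produce, given the pending `prev` and remaining input
def pvG : List Char → List Char → List Char
  | prev, [] => prev
  | prev, c :: t =>
    if c = '\n' then (if prev = ['-'] then pvG [] t else prev ++ pvG [] t)
    else prev ++ pvG [c] t

-- the result of removing non-overlapping "-\n" occurrences left to right
def pvRep2 : List Char → List Char
  | [] => []
  | [c] => [c]
  | c :: c' :: t => if c = '-' ∧ c' = '\n' then pvRep2 t else c :: pvRep2 (c' :: t)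

def pvF (l : List Char) : List Char := (pvRep2 l).filter (fun c => !(c == '\n'))

lemma pvFoldA (l : List Char) : ∀ o prev,
    ((l.foldl pvStepA (o, prev)).1 ++ (l.foldl pvStepA (o, prev)).2) = o ++ pvG prev l := by
  induction l with
  | nil => intro o prev; simp [pvG]
  | cons c t ih =>
    intro o prev
    by_cases hc : c = '\n'
    · by_cases hp : prev = ['-']
      · simp [pvStepA, pvG, hc, hp, ih]
      · simp [pvStepA, pvG, hc, hp, ih]
    · simp [pvStepA, pvG, hc, ih]

lemma pvF_nl (t : List Char) : pvF ('\n' :: t) = pvF t := by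
  cases t with
  | nil => simp [pvF, pvRep2]
  | cons c' t' => simp [pvF, pvRep2]

lemma pvF_single (c : Char) (hc : c ≠ '\n') : pvF [c] = [c] := by
  simp [pvF, pvRep2, hc]

lemma pvF_hyphen (t : List Char) : pvF ('-' :: '\n' :: t) = pvF t := by
  simp [pvF, pvRep2]

lemma pvF_pair (c d : Char) (t : List Char) (h : ¬(c = '-' ∧ d = '\n')) (hc : c ≠ '\n') :
    pvF (c :: d :: t) = c :: pvF (d :: t) := by
  simp [pvF, pvRep2, h, hc]

lemma pvG_eq_pvF (l : List Char) :
    pvG [] l = pvF l ∧ ∀ c, c ≠ '\n' → pvG [c] l = pvF (c :: l) := by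
  induction l with
  | nil =>
    refine ⟨rfl, ?_⟩
    intro c hc; rw [pvF_single c hc]; rfl
  | cons d t ih =>
    constructor
    · by_cases hd : d = '\n'
      · subst hd; rw [pvF_nl]; simpa [pvG] using ih.1
      · simpa [pvG, hd] using ih.2 d hd
    · intro c hc
      by_cases hd : d = '\n'
      · subst hd
        by_cases hm : c = '-'
        · subst hm; rw [pvF_hyphen]; simpa [pvG] using ih.1
        · rw [pvF_pair c '\n' t (by simp [hm]) hc, pvF_nl]
          simpa [pvG, hm, hc] using ih.1
      · rw [pvF_pair c d t (by simp [hd]) hc]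
        simpa [pvG, hd, hc] using ih.2 d hd

-- definitional one-step equations for PySem.Chars.replace.go
lemma pvGo_zero (old new : List Char) (l acc : List Char) :
    PySem.Chars.replace.go old new 0 l acc = acc.reverse ++ l := rfl

lemma pvGo_succ_nil (old new : List Char) (f : Nat) (acc : List Char) :
    PySem.Chars.replace.go old new (f + 1) [] acc = acc.reverse := rfl

lemma pvGo_succ_cons (old new : List Char) (f : Nat) (c : Char) (t acc : List Char) :
    PySem.Chars.replace.go old new (f + 1) (c :: t) acc
      = if old.isPrefixOf (c :: t)
        then PySem.Chars.replace.go old new f (List.drop old.length (c :: t)) (new.reverse ++ acc)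
        else PySem.Chars.replace.go old new f t (c :: acc) := rfl

-- one replace.go pass with pattern "\n" is a filter
lemma pvGo_nl : ∀ fuel l acc, l.length ≤ fuel →
    PySem.Chars.replace.go ['\n'] [] fuel l acc
      = acc.reverse ++ l.filter (fun c => !(c == '\n')) := by
  intro fuel
  induction fuel with
  | zero =>
    intro l acc h
    have : l = [] := List.eq_nil_of_length_eq_zero (Nat.le_zero.mp h)
    subst this
    simp [pvGo_zero]
  | succ f ih =>
    intro l acc h
    cases l with
    | nil => simp [pvGo_succ_nil]
    | cons c t =>
      rw [pvGo_succ_cons]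
      by_cases hc : c = '\n'
      · subst hc
        have hpre : List.isPrefixOf ['\n'] ('\n' :: t) = true := by
          simp [List.isPrefixOf]
        rw [hpre, if_pos rfl]
        simp only [List.reverse_nil, List.nil_append, List.length_cons, List.length_nil,
          List.drop_succ_cons, List.drop_zero]
        rw [ih t acc (by simpa using Nat.le_of_succ_le_succ h)]
        simp
      · have hpre : List.isPrefixOf ['\n'] (c :: t) = false := by
          simp [List.isPrefixOf]
          exact fun h' => hc h'.symm
        rw [hpre, if_neg (by simp)]
        rw [ih t (c :: acc) (by simpa using Nat.le_of_succ_le_succ h)]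
        simp [hc]

-- one replace.go pass with pattern "-\n" is pvRep2
lemma pvGo_hn : ∀ fuel l acc, l.length ≤ fuel →
    PySem.Chars.replace.go ['-', '\n'] [] fuel l acc = acc.reverse ++ pvRep2 l := by
  intro fuel
  induction fuel with
  | zero =>
    intro l acc h
    have : l = [] := List.eq_nil_of_length_eq_zero (Nat.le_zero.mp h)
    subst this
    simp [pvGo_zero, pvRep2]
  | succ f ih =>
    intro l acc h
    cases l with
    | nil => simp [pvGo_succ_nil, pvRep2]
    | cons c t =>
      rw [pvGo_succ_cons]
      cases t with
      | nil =>
        have hpre : List.isPrefixOf ['-', '\n'] [c] = false := by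
          simp [List.isPrefixOf]
        rw [hpre, if_neg (by simp)]
        rw [ih [] (c :: acc) (by simp)]
        simp [pvRep2]
      | cons c' t' =>
        by_cases hp : c = '-' ∧ c' = '\n'
        · obtain ⟨h1, h2⟩ := hp
          subst h1; subst h2
          have hpre : List.isPrefixOf ['-', '\n'] ('-' :: '\n' :: t') = true := by
            simp [List.isPrefixOf]
          rw [hpre, if_pos rfl]
          rw [show List.drop ['-', '\n'].length ('-' :: '\n' :: t') = t' from rfl]
          simp only [List.reverse_nil, List.nil_append]
          rw [ih t' acc (by simp at h ⊢; omega)]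
          simp [pvRep2]
        · have hpre : List.isPrefixOf ['-', '\n'] (c :: c' :: t') = false := by
            rcases not_and_or.mp hp with h1 | h2
            · simp [List.isPrefixOf]
              exact fun h' => absurd h'.symm h1
            · simp [List.isPrefixOf]
              intro _ h'
              exact absurd h'.symm h2
          rw [hpre, if_neg (by simp)]
          rw [ih (c' :: t') (c :: acc) (by simp at h ⊢; omega)]
          simp [pvRep2, hp]

lemma pvReplace_hn (l : List Char) : PySem.Chars.replace l ['-', '\n'] [] = pvRep2 l := by
  rw [PySem.Chars.replace]
  simpa using pvGo_hn l.length l [] le_rfl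

lemma pvReplace_nl (l : List Char) :
    PySem.Chars.replace l ['\n'] [] = l.filter (fun c => !(c == '\n')) := by
  rw [PySem.Chars.replace]
  simpa using pvGo_nl l.length l [] le_rfl

-- ===== VERDICT (by name: the statement is the Claim_ definition above) =====
theorem remove_linebreak_hyphen_spec : Claim_equal_remove_linebreak_hyphen := by
  intro s _
  unfold Spec_remove_linebreak_hyphen remove_linebreak_hyphen remove_linebreak_hyphen_alt
  have hB : PySem.Str.replace (PySem.Str.replace s "-\n" "") "\n" ""
      = String.ofList (pvF s.toList) := by
    rw [PySem.Str.replace, PySem.Str.replace]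
    rw [show ("-\n" : String).toList = ['-', '\n'] from rfl,
        show ("\n" : String).toList = ['\n'] from rfl,
        show ("" : String).toList = [] from rfl]
    rw [pvReplace_hn, String.toList_ofList, pvReplace_nl]
    rfl
  rw [hB]
  show String.ofList ((List.foldl pvStepA ([], []) s.toList).1
        ++ (List.foldl pvStepA ([], []) s.toList).2) = String.ofList (pvF s.toList)
  have hA := pvFoldA s.toList [] []
  simp only [List.nil_append] at hA
  rw [hA, (pvG_eq_pvF s.toList).1]
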